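-- pv_equiv track=rewrite | github.com/b3lab/safir_notification_service | safir_notification_service/openstack/ceillometer/ceilometer.py | make_query
-- ===== SOURCE A (Python) =====
-- def make_query(user_id=None, tenant_id=None, resource_id=None,
--                user_ids=None, tenant_ids=None, resource_ids=None):
--     """Returns query built from given parameters.
--
--     This query can be then used for querying resources, meters and
--     statistics.
--
--     :Parameters:
--       - `user_id`: user_id, has a priority over list of ids
--       - `tenant_id`: tenant_id, has a priority over list of ids
--       - `resource_id`: resource_id, has a priority over list of ids
--       - `user_ids`: list of user_ids
--       - `tenant_ids`: list of tenant_ids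
--       - `resource_ids`: list of resource_ids
--     """
--     user_ids = user_ids or []
--     tenant_ids = tenant_ids or []
--     resource_ids = resource_ids or []
--
--     query = []
--     if user_id:
--         user_ids = [user_id]
--     for u_id in user_ids:
--         query.append({"field": "user_id", "op": "eq", "value": u_id})
--
--     if tenant_id:
--         tenant_ids = [tenant_id]
--     for t_id in tenant_ids:
--         query.append({"field": "project_id", "op": "eq", "value": t_id})
--
--     if resource_id:
--         resource_ids = [resource_id]
--     for r_id in resource_ids:
--         query.append({"field": "resource_id", "op": "eq", "value": r_id})
--
--     return query
-- ===== SOURCE B (Python) =====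
-- def make_query(user_id=None, tenant_id=None, resource_id=None,
--                user_ids=None, tenant_ids=None, resource_ids=None):
--     def pairs(specs):
--         if not specs:
--             return []
--         (field, single, many), rest = specs[0], specs[1:]
--         values = [single] if single else list(many or [])
--         return [(field, v) for v in values] + pairs(rest)
--     fv = pairs([("user_id", user_id, user_ids),
--                 ("project_id", tenant_id, tenant_ids),
--                 ("resource_id", resource_id, resource_ids)])
--     return [{"field": f, "op": "eq", "value": v} for f, v in fv]
-- ===== Notes on version B (the rewrite author's own statement) =====
-- stated objective: alternative
-- what changed: Replaces A's single-pass unrolled if/for blocks that append dicts directly with a two-stage pipeline: a recursive helper first collects a flat list of (field, value) pairs over a spec list, then one final comprehension renders every pair into its query dict.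
import Mathlib
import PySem

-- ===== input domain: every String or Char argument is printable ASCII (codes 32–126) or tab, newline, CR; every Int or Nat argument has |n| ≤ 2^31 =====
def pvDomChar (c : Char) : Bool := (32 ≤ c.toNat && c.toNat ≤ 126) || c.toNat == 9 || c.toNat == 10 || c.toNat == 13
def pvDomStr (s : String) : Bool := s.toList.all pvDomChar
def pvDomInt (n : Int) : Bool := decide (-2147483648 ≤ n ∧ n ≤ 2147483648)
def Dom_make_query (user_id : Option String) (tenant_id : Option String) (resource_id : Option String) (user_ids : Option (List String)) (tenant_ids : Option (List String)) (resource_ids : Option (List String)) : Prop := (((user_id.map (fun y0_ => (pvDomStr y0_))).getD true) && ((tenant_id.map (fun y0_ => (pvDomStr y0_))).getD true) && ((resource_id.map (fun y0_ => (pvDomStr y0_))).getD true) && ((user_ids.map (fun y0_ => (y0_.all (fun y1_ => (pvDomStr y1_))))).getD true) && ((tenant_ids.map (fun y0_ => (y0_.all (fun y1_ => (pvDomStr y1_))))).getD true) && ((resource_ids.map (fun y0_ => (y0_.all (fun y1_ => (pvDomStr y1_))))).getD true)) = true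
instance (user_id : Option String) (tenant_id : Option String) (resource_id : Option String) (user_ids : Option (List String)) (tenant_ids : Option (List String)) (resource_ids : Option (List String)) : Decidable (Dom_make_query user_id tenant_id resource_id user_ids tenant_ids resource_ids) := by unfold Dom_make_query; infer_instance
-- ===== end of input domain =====

-- ===== PORT A =====
-- B re-decomposes A into a two-stage pipeline (recursive (field,value)-pair collection, then dict rendering); same cost, return value proved equal.
def make_query (user_id : Option String) (tenant_id : Option String) (resource_id : Option String) (user_ids : Option (List String)) (tenant_ids : Option (List String)) (resource_ids : Option (List String)) : List (List (String × String)) :=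
  -- `xs or []` : None or empty list becomes []
  let user_ids := user_ids.getD []
  let tenant_ids := tenant_ids.getD []
  let resource_ids := resource_ids.getD []
  -- `if user_id: user_ids = [user_id]` (truthy = some nonempty string)
  let user_ids := match user_id with
    | some s => if s ≠ "" then [s] else user_ids
    | none => user_ids
  let query : List (List (String × String)) := []
  let query := user_ids.foldl (fun q u => q ++ [[("field", "user_id"), ("op", "eq"), ("value", u)]]) query
  let tenant_ids := match tenant_id with
    | some s => if s ≠ "" then [s] else tenant_ids
    | none => tenant_ids
  let query := tenant_ids.foldl (fun q t => q ++ [[("field", "project_id"), ("op", "eq"), ("value", t)]]) query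
  let resource_ids := match resource_id with
    | some s => if s ≠ "" then [s] else resource_ids
    | none => resource_ids
  let query := resource_ids.foldl (fun q r => q ++ [[("field", "resource_id"), ("op", "eq"), ("value", r)]]) query
  query

-- ===== PORT B =====
-- Stage 1 of B: recursively collect (field, value) pairs from the spec list.
-- `values = [single] if single else list(many or [])` (truthy single = some nonempty string)
def pvPairs : List (String × Option String × Option (List String)) → List (String × String)
  | [] => []
  | (field, single, many) :: rest =>
      let values : List String :=
        match single with
        | some s => if s ≠ "" then [s] else many.getD []
        | none => many.getD []
      values.map (fun v => (field, v)) ++ pvPairs rest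

def make_query_alt (user_id : Option String) (tenant_id : Option String) (resource_id : Option String) (user_ids : Option (List String)) (tenant_ids : Option (List String)) (resource_ids : Option (List String)) : List (List (String × String)) :=
  let fv := pvPairs [("user_id", user_id, user_ids),
                     ("project_id", tenant_id, tenant_ids),
                     ("resource_id", resource_id, resource_ids)]
  -- Stage 2 of B: render each pair into its query dict.
  fv.map (fun p => [("field", p.1), ("op", "eq"), ("value", p.2)])

-- ===== PRECONDITION & SPEC =====
def Spec_make_query (user_id : Option String) (tenant_id : Option String) (resource_id : Option String) (user_ids : Option (List String)) (tenant_ids : Option (List String)) (resource_ids : Option (List String)) (out : List (List (String × String))) : Prop := out = make_query_alt user_id tenant_id resource_id user_ids tenant_ids resource_ids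
instance (user_id : Option String) (tenant_id : Option String) (resource_id : Option String) (user_ids : Option (List String)) (tenant_ids : Option (List String)) (resource_ids : Option (List String)) (out : List (List (String × String))) : Decidable (Spec_make_query user_id tenant_id resource_id user_ids tenant_ids resource_ids out) := by unfold Spec_make_query; infer_instance

-- ===== CLAIM (what is proved, stated in full; the proofs are below) =====
def Claim_equal_make_query : Prop := ∀ (user_id : Option String) (tenant_id : Option String) (resource_id : Option String) (user_ids : Option (List String)) (tenant_ids : Option (List String)) (resource_ids : Option (List String)), Dom_make_query user_id tenant_id resource_id user_ids tenant_ids resource_ids → Spec_make_query user_id tenant_id resource_id user_ids tenant_ids resource_ids (make_query user_id tenant_id resource_id user_ids tenant_ids resource_ids)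

-- ===== LEMMAS AND PROOFS =====

-- ===== VERDICT (by name: the statement is the Claim_ definition above) =====
theorem flatten_map_single {α β : Type} (g : α → β) (l : List α) :
    (l.map (fun x => [g x])).flatten = l.map g := by
  induction l <;> simp [*]

theorem make_query_spec : Claim_equal_make_query := by
  intro user_id tenant_id resource_id user_ids tenant_ids resource_ids _
  unfold Spec_make_query make_query make_query_alt
  cases user_id <;> cases tenant_id <;> cases resource_id <;>
    simp [pvPairs, flatten_map_single, Function.comp_def]
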